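-- pv_equiv track=rewrite | github.com/786440445/leecode | src/1013.py | canThreePartsEqualSum
-- ===== SOURCE A (Python) =====
-- def canThreePartsEqualSum(A) -> bool:
--     leng = len(A)
--     for i in range(1, leng):
--         for j in range(i + 1, leng):
--             sum1 = 0
--             sum2 = 0
--             sum3 = 0
--             for index in range(0, i):
--                 sum1 += A[index]
--             for index in range(i, j):
--                 sum2 += A[index]
--             for index in range(j, leng):
--                 sum3 += A[index]
--             if sum1 == sum2 and sum1 == sum3:
--                 return True
--     return False
-- ===== SOURCE B (Python) =====
-- def canThreePartsEqualSum(A) -> bool: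
--     total = sum(A)
--     if total % 3 != 0:
--         return False
--     target = total // 3
--     cum = 0
--     first = False
--     for x in A[:-1]:
--         cum += x
--         if not first:
--             if cum == target:
--                 first = True
--         elif cum == 2 * target:
--             return True
--     return False
-- ===== Notes on version B (the rewrite author's own statement) =====
-- stated objective: faster
-- what changed: Replaced the O(n^3) enumeration of all cut pairs (i,j) with recomputed segment sums by a single left-to-right prefix-sum scan that looks for the first prefix equal to total/3 and then a later prefix equal to 2*total/3, after an O(1) divisibility test.
import Mathlib
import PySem

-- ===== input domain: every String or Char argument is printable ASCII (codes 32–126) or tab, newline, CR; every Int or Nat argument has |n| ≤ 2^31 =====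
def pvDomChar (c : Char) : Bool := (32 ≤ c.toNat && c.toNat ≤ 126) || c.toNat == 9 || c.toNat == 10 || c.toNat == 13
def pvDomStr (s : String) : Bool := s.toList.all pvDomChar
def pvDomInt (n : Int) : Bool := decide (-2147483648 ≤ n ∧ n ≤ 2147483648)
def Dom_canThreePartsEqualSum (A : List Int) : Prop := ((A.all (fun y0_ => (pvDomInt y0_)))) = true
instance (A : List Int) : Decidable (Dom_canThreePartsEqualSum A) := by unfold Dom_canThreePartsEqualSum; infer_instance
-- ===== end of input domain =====

-- B replaces A's cubic scan over all cut pairs with a single linear prefix-sum pass (objective: faster, asymptotic).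

-- ===== PORT A =====
def canThreePartsEqualSum (A : List Int) : Bool :=
  let leng : Int := A.length
  (PySem.List.pyRange 1 leng 1).any (fun i =>
    (PySem.List.pyRange (i + 1) leng 1).any (fun j =>
      let sum1 : Int := (PySem.List.pyRange 0 i 1).foldl (fun s index => s + PySem.List.pyGetD A index 0) 0
      let sum2 : Int := (PySem.List.pyRange i j 1).foldl (fun s index => s + PySem.List.pyGetD A index 0) 0
      let sum3 : Int := (PySem.List.pyRange j leng 1).foldl (fun s index => s + PySem.List.pyGetD A index 0) 0
      sum1 == sum2 && sum1 == sum3))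

-- ===== PORT B =====
-- the scan loop of Source B: state (cum, first), early return on the second cut
def altGo (target : Int) : List Int → Int → Bool → Bool
  | [], _, _ => false
  | x :: xs, cum, first =>
    let c := cum + x
    if first = false then altGo target xs c (c == target)
    else if c == 2 * target then true
    else altGo target xs c true

def canThreePartsEqualSum_alt (A : List Int) : Bool :=
  let total := A.sum
  if PySem.Int.mod total 3 ≠ 0 then false
  else altGo (PySem.Int.floordiv total 3) (PySem.List.slice A none (some (-1))) 0 false

-- ===== PRECONDITION & SPEC =====
def Spec_canThreePartsEqualSum (A : List Int) (out : Bool) : Prop := out = canThreePartsEqualSum_alt A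
instance (A : List Int) (out : Bool) : Decidable (Spec_canThreePartsEqualSum A out) := by unfold Spec_canThreePartsEqualSum; infer_instance

-- ===== CLAIM (what is proved, stated in full; the proofs are below) =====
def Claim_equal_canThreePartsEqualSum : Prop := ∀ (A : List Int), Dom_canThreePartsEqualSum A → Spec_canThreePartsEqualSum A (canThreePartsEqualSum A)

-- ===== LEMMAS AND PROOFS =====

-- prefix sum of the first n elements
def preS (A : List Int) (n : Nat) : Int := (A.take n).sum

lemma preS_succ (A : List Int) (n : Nat) (h : n < A.length) :
    preS A (n + 1) = preS A n + A.getD n 0 := by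
  unfold preS
  rw [List.take_add_one, List.getElem?_eq_getElem h, List.sum_append]
  simp [List.getD_eq_getElem?_getD, List.getElem?_eq_getElem h]

lemma preS_cons (x : Int) (xs : List Int) (n : Nat) :
    preS (x :: xs) (n + 1) = x + preS xs n := by
  simp [preS]

lemma foldl_range_sum (A : List Int) (a b : Nat) (hab : a ≤ b) (hb : b ≤ A.length) :
    (PySem.List.pyRange (a : Int) (b : Int) 1).foldl
      (fun s index => s + PySem.List.pyGetD A index 0) 0 = preS A b - preS A a := by
  induction b with
  | zero =>
    have ha : a = 0 := by omega
    subst ha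
    simp [PySem.List.pyRange_one_eq_nil]
  | succ b ih =>
    by_cases h : a = b + 1
    · subst h
      simp [PySem.List.pyRange_one_eq_nil]
    · have hab' : a ≤ b := by omega
      have hcast : ((b + 1 : Nat) : Int) = (b : Int) + 1 := by push_cast; ring
      rw [hcast, PySem.List.pyRange_one_succ_right (by exact_mod_cast hab'),
          List.foldl_append]
      simp only [List.foldl_cons, List.foldl_nil]
      rw [ih hab' (by omega), PySem.List.pyGetD_natCast]
      rw [preS_succ A b (by omega)]
      ring

lemma canA_iff (A : List Int) : canThreePartsEqualSum A = true ↔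
    ∃ i j : Nat, 1 ≤ i ∧ i < j ∧ j < A.length ∧
      preS A i = preS A j - preS A i ∧ preS A i = A.sum - preS A j := by
  simp only [canThreePartsEqualSum, List.any_eq_true, PySem.List.mem_pyRange_one,
    Bool.and_eq_true, beq_iff_eq]
  constructor
  · rintro ⟨i, ⟨hi1, hi2⟩, j, ⟨hj1, hj2⟩, h12, h13⟩
    have hi' : i = ((i.toNat : Nat) : Int) := by omega
    have hj' : j = ((j.toNat : Nat) : Int) := by omega
    rw [hi'] at hi2 hj1 h12 h13
    rw [hj'] at hj2 h12 h13
    refine ⟨i.toNat, j.toNat, by omega, by omega, by omega, ?_, ?_⟩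
    · have e1 := foldl_range_sum A 0 i.toNat (by omega) (by omega)
      have e2 := foldl_range_sum A i.toNat j.toNat (by omega) (by omega)
      rw [show ((0:Nat):Int) = (0:Int) by norm_num] at e1
      rw [e1, e2] at h12
      simpa [preS] using h12
    · have e1 := foldl_range_sum A 0 i.toNat (by omega) (by omega)
      have e3 := foldl_range_sum A j.toNat A.length (by omega) (by omega)
      rw [show ((0:Nat):Int) = (0:Int) by norm_num] at e1
      rw [e1, e3] at h13
      simpa [preS] using h13
  · rintro ⟨i, j, hi1, hij, hj, h12, h13⟩
    refine ⟨(i : Int), ⟨by omega, by omega⟩, (j : Int), ⟨by omega, by omega⟩, ?_, ?_⟩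
    · have e1 := foldl_range_sum A 0 i (by omega) (by omega)
      have e2 := foldl_range_sum A i j (by omega) (by omega)
      rw [show ((0:Nat):Int) = (0:Int) by norm_num] at e1
      rw [e1, e2]
      simpa [preS] using h12
    · have e1 := foldl_range_sum A 0 i (by omega) (by omega)
      have e3 := foldl_range_sum A j A.length (by omega) (by omega)
      rw [show ((0:Nat):Int) = (0:Int) by norm_num] at e1
      rw [e1, e3]
      simpa [preS] using h13

lemma altGo_spec (t : Int) : ∀ (xs : List Int) (cum : Int),
    (altGo t xs cum true = true ↔
      ∃ q : Nat, 1 ≤ q ∧ q ≤ xs.length ∧ cum + preS xs q = 2 * t) ∧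
    (altGo t xs cum false = true ↔
      ∃ p q : Nat, 1 ≤ p ∧ p < q ∧ q ≤ xs.length ∧
        cum + preS xs p = t ∧ cum + preS xs q = 2 * t) := by
  intro xs
  induction xs with
  | nil =>
    intro cum
    constructor
    · simp [altGo]
    · simp [altGo]
  | cons x xs ih =>
    intro cum
    constructor
    · by_cases hc : cum + x = 2 * t
      · simp only [altGo, hc]
        constructor
        · intro _
          exact ⟨1, le_refl 1, by simp, by simpa [preS] using hc⟩
        · intro _; simp
      · have : altGo t (x :: xs) cum true = altGo t xs (cum + x) true := by
          simp [altGo, hc]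
        rw [this, (ih (cum + x)).1]
        constructor
        · rintro ⟨q, hq1, hq2, hq3⟩
          exact ⟨q + 1, by omega, by simp; omega, by rw [preS_cons]; omega⟩
        · rintro ⟨q, hq1, hq2, hq3⟩
          rcases q with _ | q'
          · omega
          · rcases q' with _ | q''
            · exfalso; apply hc; simpa [preS] using hq3
            · refine ⟨q'' + 1, by omega, by simp at hq2; omega, ?_⟩
              rw [preS_cons] at hq3; omega
    · by_cases hc : cum + x = t
      · have : altGo t (x :: xs) cum false = altGo t xs (cum + x) true := by
          simp [altGo, hc]
        rw [this, (ih (cum + x)).1]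
        constructor
        · rintro ⟨q, hq1, hq2, hq3⟩
          refine ⟨1, q + 1, le_refl 1, by omega, by simp; omega, ?_, ?_⟩
          · simpa [preS] using hc
          · rw [preS_cons]; omega
        · rintro ⟨p, q, hp1, hpq, hq2, hp3, hq3⟩
          obtain ⟨q', rfl⟩ : ∃ q', q = q' + 2 := ⟨q - 2, by omega⟩
          refine ⟨q' + 1, by omega, by simp at hq2; omega, ?_⟩
          rw [preS_cons] at hq3; omega
      · have hb : (cum + x == t) = false := by simp [hc]
        have : altGo t (x :: xs) cum false = altGo t xs (cum + x) false := by
          simp [altGo, hb]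
        rw [this, (ih (cum + x)).2]
        constructor
        · rintro ⟨p, q, hp1, hpq, hq2, hp3, hq3⟩
          refine ⟨p + 1, q + 1, by omega, by omega, by simp; omega, ?_, ?_⟩
          · rw [preS_cons]; omega
          · rw [preS_cons]; omega
        · rintro ⟨p, q, hp1, hpq, hq2, hp3, hq3⟩
          rcases p with _ | p'
          · omega
          · rcases p' with _ | p''
            · exfalso; apply hc; simpa [preS] using hp3
            · obtain ⟨q', rfl⟩ : ∃ q', q = q' + 3 := ⟨q - 3, by omega⟩
              refine ⟨p'' + 1, q' + 2, by omega, by omega, by simp at hq2; omega, ?_, ?_⟩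
              · rw [preS_cons] at hp3; omega
              · rw [preS_cons] at hq3; omega

lemma preS_dropLast (A : List Int) (n : Nat) (h : n ≤ A.length - 1) :
    preS A.dropLast n = preS A n := by
  unfold preS
  rw [List.dropLast_eq_take, List.take_take, min_eq_left h]

lemma canB_iff (A : List Int) : canThreePartsEqualSum_alt A = true ↔
    PySem.Int.mod A.sum 3 = 0 ∧
      ∃ p q : Nat, 1 ≤ p ∧ p < q ∧ q ≤ A.length - 1 ∧
        preS A p = PySem.Int.floordiv A.sum 3 ∧
        preS A q = 2 * PySem.Int.floordiv A.sum 3 := by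
  unfold canThreePartsEqualSum_alt
  simp only [PySem.List.slice_to_neg_one]
  by_cases hm : PySem.Int.mod A.sum 3 = 0
  · rw [if_neg (not_not_intro hm)]
    rw [(altGo_spec (PySem.Int.floordiv A.sum 3) A.dropLast 0).2]
    have hlen : A.dropLast.length = A.length - 1 := by simp
    constructor
    · rintro ⟨p, q, hp1, hpq, hq2, hp3, hq3⟩
      rw [hlen] at hq2
      rw [preS_dropLast A p (by omega)] at hp3
      rw [preS_dropLast A q (by omega)] at hq3
      exact ⟨hm, p, q, hp1, hpq, hq2, by omega, by omega⟩
    · rintro ⟨_, p, q, hp1, hpq, hq2, hp3, hq3⟩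
      refine ⟨p, q, hp1, hpq, by omega, ?_, ?_⟩
      · rw [preS_dropLast A p (by omega)]; omega
      · rw [preS_dropLast A q (by omega)]; omega
  · rw [if_pos hm]
    exact iff_of_false (by simp) (fun h => hm h.1)

lemma bridge (A : List Int) :
    (∃ i j : Nat, 1 ≤ i ∧ i < j ∧ j < A.length ∧
        preS A i = preS A j - preS A i ∧ preS A i = A.sum - preS A j) ↔
    (PySem.Int.mod A.sum 3 = 0 ∧
      ∃ p q : Nat, 1 ≤ p ∧ p < q ∧ q ≤ A.length - 1 ∧
        preS A p = PySem.Int.floordiv A.sum 3 ∧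
        preS A q = 2 * PySem.Int.floordiv A.sum 3) := by
  constructor
  · rintro ⟨i, j, hi1, hij, hj, h12, h13⟩
    have hsum : A.sum = 3 * preS A i := by omega
    have hdvd : (3 : Int) ∣ A.sum := ⟨preS A i, hsum⟩
    have hm : PySem.Int.mod A.sum 3 = 0 := (PySem.Int.mod_eq_zero_iff_dvd _ _).mpr hdvd
    have hfd := PySem.Int.floordiv_mul_add_mod A.sum 3
    rw [hm] at hfd
    have hfi : PySem.Int.floordiv A.sum 3 = preS A i := by omega
    exact ⟨hm, i, j, hi1, hij, by omega, by omega, by omega⟩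
  · rintro ⟨hm, p, q, hp1, hpq, hq2, hp3, hq3⟩
    have hfd := PySem.Int.floordiv_mul_add_mod A.sum 3
    rw [hm] at hfd
    exact ⟨p, q, hp1, hpq, by omega, by omega, by omega⟩

-- ===== VERDICT (by name: the statement is the Claim_ definition above) =====
theorem canThreePartsEqualSum_spec : Claim_equal_canThreePartsEqualSum := by
  intro A _
  unfold Spec_canThreePartsEqualSum
  rw [Bool.eq_iff_iff, canA_iff, canB_iff]
  exact bridge A
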